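-- pv_equiv track=rewrite | github.com/NexU20/Algorithms | dal1.py | brute_force_count
-- ===== SOURCE A (Python) =====
-- def brute_force_count(arr):
--     minimum = arr[0]
--     maximum = arr[0]
--     comparisons = 0
--
--     for i in range(1, len(arr)):
--         # satu perbandingan untuk min
--         comparisons += 1
--         if arr[i] < minimum:
--             minimum = arr[i]
--         # satu perbandingan untuk max
--         comparisons += 1
--         if arr[i] > maximum:
--             maximum = arr[i]
--
--     return comparisons
-- ===== SOURCE B (Python) =====
-- def brute_force_count(arr):
--     # closed form: the loop always performs 2 comparisons per element after the first
--     return 2 * (len(arr) - 1)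
-- ===== Notes on version B (the rewrite author's own statement) =====
-- stated objective: faster
-- what changed: Replaces the O(n) min/max scanning loop with the closed form 2*(len(arr)-1), since the comparison counter is incremented exactly twice per iteration regardless of the data.
-- outside the precondition, e.g. on brute_force_count([]): A raises IndexError, B returns -2
import Mathlib
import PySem

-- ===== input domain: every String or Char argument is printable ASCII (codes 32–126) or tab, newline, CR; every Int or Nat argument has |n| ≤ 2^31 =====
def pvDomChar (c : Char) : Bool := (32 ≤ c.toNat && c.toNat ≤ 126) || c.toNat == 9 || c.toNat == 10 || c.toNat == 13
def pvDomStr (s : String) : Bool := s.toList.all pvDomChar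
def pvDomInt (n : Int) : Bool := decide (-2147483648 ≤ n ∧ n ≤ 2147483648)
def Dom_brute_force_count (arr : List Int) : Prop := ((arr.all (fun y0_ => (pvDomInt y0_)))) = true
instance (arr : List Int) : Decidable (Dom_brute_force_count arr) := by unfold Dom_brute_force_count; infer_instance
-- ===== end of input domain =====

-- B replaces A's O(n) scanning loop by the closed form 2*(len(arr)-1) (the counter
-- is incremented exactly twice per iteration, independent of the data).


-- ===== PORT A =====
-- literal port of A: scan indices 1..len-1, keeping (minimum, maximum, comparisons);
-- arr[0] (an IndexError on []) is excluded by Pre_, so the default of pyGetD is never used there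
def brute_force_count (arr : List Int) : Int :=
  let minimum := PySem.List.pyGetD arr 0 0
  let maximum := PySem.List.pyGetD arr 0 0
  let comparisons : Int := 0
  let s := (PySem.List.pyRange 1 (arr.length : Int) 1).foldl
    (fun (st : Int × Int × Int) i =>
      let (minimum, maximum, comparisons) := st
      let comparisons := comparisons + 1
      let minimum := if PySem.List.pyGetD arr i 0 < minimum then PySem.List.pyGetD arr i 0 else minimum
      let comparisons := comparisons + 1
      let maximum := if PySem.List.pyGetD arr i 0 > maximum then PySem.List.pyGetD arr i 0 else maximum
      (minimum, maximum, comparisons))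
    (minimum, maximum, comparisons)
  s.2.2

-- ===== PORT B =====
def brute_force_count_alt (arr : List Int) : Int :=
  2 * ((arr.length : Int) - 1)

-- ===== PRECONDITION & SPEC =====
-- Pre_ excludes only the empty list, on which A raises IndexError at arr[0]
def Pre_brute_force_count (arr : List Int) : Prop := arr ≠ []
instance (arr : List Int) : Decidable (Pre_brute_force_count arr) := by unfold Pre_brute_force_count; infer_instance
def pvWitness_brute_force_count : List Int := ([1, 3, 2])

def Spec_brute_force_count (arr : List Int) (out : Int) : Prop := out = brute_force_count_alt arr
instance (arr : List Int) (out : Int) : Decidable (Spec_brute_force_count arr out) := by unfold Spec_brute_force_count; infer_instance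

-- ===== CLAIM (what is proved, stated in full; the proofs are below) =====
def Claim_equal_brute_force_count : Prop := ∀ (arr : List Int), Dom_brute_force_count arr → Pre_brute_force_count arr → Spec_brute_force_count arr (brute_force_count arr)

-- ===== LEMMAS AND PROOFS =====

-- the loop's comparison counter grows by exactly 2 per iteration, whatever the state
theorem pv_counter (arr : List Int) (l : List Int) (s : Int × Int × Int) :
    (l.foldl
      (fun (st : Int × Int × Int) i =>
        let (minimum, maximum, comparisons) := st
        let comparisons := comparisons + 1
        let minimum := if PySem.List.pyGetD arr i 0 < minimum then PySem.List.pyGetD arr i 0 else minimum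
        let comparisons := comparisons + 1
        let maximum := if PySem.List.pyGetD arr i 0 > maximum then PySem.List.pyGetD arr i 0 else maximum
        (minimum, maximum, comparisons))
      s).2.2 = s.2.2 + 2 * (l.length : Int) := by
  induction l generalizing s with
  | nil => simp
  | cons x xs ih =>
    obtain ⟨m, M, c⟩ := s
    simp only [List.foldl_cons, ih]
    simp only [List.length_cons]
    push_cast
    ring

-- ===== VERDICT (by name: the statement is the Claim_ definition above) =====
theorem brute_force_count_spec : Claim_equal_brute_force_count := by
  intro arr _ hpre
  unfold Spec_brute_force_count brute_force_count brute_force_count_alt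
  simp only [pv_counter, PySem.List.length_pyRange_one]
  have h : 1 ≤ arr.length := List.length_pos_iff.mpr hpre
  omega
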